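-- pv_equiv track=rewrite | github.com/YJNDL/yjndl.github.io | downloads/version_4.0.py | canonicalize_global_inversion
-- ===== SOURCE A (Python) =====
-- def canonicalize_global_inversion(hkl):
--     """
--     把 (h, k, l) 与 (-h, -k, -l) 视为同一组，仅保留一个代表。
--
--     注意这里只合并全局反号，不合并 102 与 012 这种由点群旋转得到的不同方向。
--     """
--     if all(value == 0 for value in hkl):
--         return hkl
--
--     for value in hkl:
--         if value > 0:
--             return hkl
--         if value < 0:
--             return tuple(-item for item in hkl)
--     return hkl
-- ===== SOURCE B (Python) =====
-- def canonicalize_global_inversion(hkl):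
--     neg = type(hkl)(-item for item in hkl)
--     return max(hkl, neg)
-- ===== Notes on version B (the rewrite author's own statement) =====
-- stated objective: simpler
-- what changed: Replaces the all-zero check plus explicit first-nonzero sign scan with a single lexicographic comparison: return max(hkl, -hkl), since element-wise sequence comparison picks the representative whose first nonzero coordinate is positive (and ties on all-zero input).
import Mathlib
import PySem

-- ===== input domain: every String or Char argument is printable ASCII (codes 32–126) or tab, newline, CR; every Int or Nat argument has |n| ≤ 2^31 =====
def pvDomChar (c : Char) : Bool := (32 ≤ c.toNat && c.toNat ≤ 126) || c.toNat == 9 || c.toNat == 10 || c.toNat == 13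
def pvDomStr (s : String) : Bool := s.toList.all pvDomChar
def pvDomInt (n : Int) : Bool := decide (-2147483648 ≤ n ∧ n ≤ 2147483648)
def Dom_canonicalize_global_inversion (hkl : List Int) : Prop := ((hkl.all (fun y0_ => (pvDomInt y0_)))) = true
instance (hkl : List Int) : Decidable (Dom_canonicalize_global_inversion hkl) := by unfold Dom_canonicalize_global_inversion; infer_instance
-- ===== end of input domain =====

-- B replaces A's all-zero check + first-nonzero sign scan by one lexicographic
-- comparison max(hkl, -hkl) (objective: simpler). Return value only.


-- ===== PORT A =====
-- the 'for value in hkl' loop: first positive → hkl, first negative → negated hkl, else continue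
def canonLoopA (hkl : List Int) : List Int → List Int
  | [] => hkl
  | v :: t =>
    if v > 0 then hkl
    else if v < 0 then hkl.map (fun item => -item)
    else canonLoopA hkl t

def canonicalize_global_inversion (hkl : List Int) : List Int :=
  if hkl.all (fun value => value == 0) then hkl
  else canonLoopA hkl hkl

-- ===== PORT B =====
-- Python's lexicographic '<' on int sequences
def pyListLt : List Int → List Int → Bool
  | [], [] => false
  | [], _ :: _ => true
  | _ :: _, [] => false
  | a :: s, b :: t => if a < b then true else if b < a then false else pyListLt s t

-- max(hkl, neg): hkl unless hkl < neg
def canonicalize_global_inversion_alt (hkl : List Int) : List Int :=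
  let neg := hkl.map (fun item => -item)
  if pyListLt hkl neg then neg else hkl

-- ===== PRECONDITION & SPEC =====
def Spec_canonicalize_global_inversion (hkl : List Int) (out : List Int) : Prop := out = canonicalize_global_inversion_alt hkl
instance (hkl : List Int) (out : List Int) : Decidable (Spec_canonicalize_global_inversion hkl out) := by unfold Spec_canonicalize_global_inversion; infer_instance

-- ===== CLAIM (what is proved, stated in full; the proofs are below) =====
def Claim_equal_canonicalize_global_inversion : Prop := ∀ (hkl : List Int), Dom_canonicalize_global_inversion hkl → Spec_canonicalize_global_inversion hkl (canonicalize_global_inversion hkl)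

-- ===== LEMMAS AND PROOFS =====
-- A's loop equals B's comparison-based selection, for any remaining suffix
theorem canonLoopA_eq_lt (hkl : List Int) : ∀ (rest : List Int),
    canonLoopA hkl rest =
      (if pyListLt rest (rest.map (fun item => -item)) then hkl.map (fun item => -item) else hkl) := by
  intro rest
  induction rest with
  | nil => simp [canonLoopA, pyListLt]
  | cons v t ih =>
    simp only [canonLoopA, List.map_cons, pyListLt]
    rcases lt_trichotomy v 0 with h | h | h
    · have h1 : v < -v := by omega
      have h2 : ¬ v > 0 := by omega
      simp [h1, h, h2]
    · subst h
      simpa using ih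
    · have h1 : ¬ v < -v := by omega
      have h2 : -v < v := by omega
      simp [h1, h2, h]

theorem pyListLt_self_neg_of_all_zero (l : List Int)
    (h : l.all (fun value => value == 0) = true) :
    pyListLt l (l.map (fun item => -item)) = false := by
  induction l with
  | nil => simp [pyListLt]
  | cons v t ih =>
    simp only [List.all_cons, Bool.and_eq_true, beq_iff_eq] at h
    obtain ⟨hv, ht⟩ := h
    subst hv
    simpa [pyListLt] using ih ht

-- ===== VERDICT (by name: the statement is the Claim_ definition above) =====
theorem canonicalize_global_inversion_spec : Claim_equal_canonicalize_global_inversion := by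
  intro hkl _
  unfold Spec_canonicalize_global_inversion canonicalize_global_inversion canonicalize_global_inversion_alt
  by_cases h : hkl.all (fun value => value == 0) = true
  · simp [h, pyListLt_self_neg_of_all_zero hkl h]
  · simp [h, canonLoopA_eq_lt hkl hkl]
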